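-- pv_equiv track=rewrite | github.com/asadrizvi64/3D-Scene-Generation-from-Urdu-Speech | NLP.py | splitSentence
-- ===== SOURCE A (Python) =====
-- def splitSentence(data):
--     sentences = []
--     sentence = []
--     words = data.split(" ")
--
--     for i in range(len(words)):
--         sentence.append(words[i])
--         if words[i] == "hai" and (i==len(words)-1 or words[i+1]=="aur"):
--             sentences.append(" ".join(sentence))
--             sentence.clear()
--
--     if len(sentence)!=0:
--         sentences.append(" ".join(sentence))
--
--
--     return sentences
-- ===== SOURCE B (Python) =====
-- def splitSentence(data):
--     words = data.split(" ")
--     n = len(words)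
--     bounds = [i for i in range(n) if words[i] == "hai" and (i == n - 1 or words[i + 1] == "aur")]
--     sentences = []
--     start = 0
--     for i in bounds:
--         sentences.append(" ".join(words[start:i + 1]))
--         start = i + 1
--     if start < n:
--         sentences.append(" ".join(words[start:]))
--     return sentences
-- ===== Notes on version B (the rewrite author's own statement) =====
-- stated objective: alternative
-- what changed: Replaces A's append/clear running-sentence accumulator with a two-phase decomposition: first collect all boundary indices in one pass, then cut the word list into slices at those indices and join each slice.
import Mathlib
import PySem

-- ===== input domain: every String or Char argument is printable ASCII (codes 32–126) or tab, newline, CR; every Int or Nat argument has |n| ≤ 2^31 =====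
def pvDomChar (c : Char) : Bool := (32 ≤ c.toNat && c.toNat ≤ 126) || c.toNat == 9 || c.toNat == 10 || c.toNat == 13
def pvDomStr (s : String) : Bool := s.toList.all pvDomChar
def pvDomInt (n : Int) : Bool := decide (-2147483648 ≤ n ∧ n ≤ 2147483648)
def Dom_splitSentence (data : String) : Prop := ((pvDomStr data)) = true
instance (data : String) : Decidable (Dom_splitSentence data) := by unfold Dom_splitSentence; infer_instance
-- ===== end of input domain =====

-- B replaces A's append/clear sentence accumulator with a boundary-index collection pass
-- followed by a slicing pass (alternative decomposition, same cost).

-- ===== PORT A =====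
-- data.split(" "): sep is the literal " " ≠ "", so PySem.Str.split? is always `some`; .getD [] is never taken
def splitSentence (data : String) : List String :=
  let words := (PySem.Str.split? data " ").getD []
  let n := words.length
  let st := (List.range n).foldl (fun (st : List String × List String) (i : Nat) =>
      let sentence := st.2 ++ [words.getD i ""]
      if words.getD i "" = "hai" ∧ (i = n - 1 ∨ words.getD (i+1) "" = "aur") then
        (st.1 ++ [PySem.Str.join " " sentence], ([] : List String))
      else
        (st.1, sentence)) ([], [])
  if st.2 ≠ [] then st.1 ++ [PySem.Str.join " " st.2] else st.1

-- ===== PORT B =====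
def splitSentence_alt (data : String) : List String :=
  let words := (PySem.Str.split? data " ").getD []
  let n := words.length
  let bounds := (List.range n).filter (fun (i : Nat) =>
      words.getD i "" == "hai" && (i == n - 1 || words.getD (i+1) "" == "aur"))
  let st := bounds.foldl (fun (st : List String × Nat) (i : Nat) =>
      (st.1 ++ [PySem.Str.join " " (PySem.List.slice words (some (st.2 : Int)) (some ((i : Int) + 1)))],
       i + 1)) ([], 0)
  if st.2 < n then st.1 ++ [PySem.Str.join " " (PySem.List.slice words (some (st.2 : Int)) none)]
  else st.1

-- ===== PRECONDITION & SPEC =====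
def Spec_splitSentence (data : String) (out : List String) : Prop := out = splitSentence_alt data
instance (data : String) (out : List String) : Decidable (Spec_splitSentence data out) := by unfold Spec_splitSentence; infer_instance

-- ===== CLAIM (what is proved, stated in full; the proofs are below) =====
def Claim_equal_splitSentence : Prop := ∀ (data : String), Dom_splitSentence data → Spec_splitSentence data (splitSentence data)

-- ===== LEMMAS AND PROOFS =====

-- reference recursion: sentences emitted for the pending sentence `cur` and the remaining words
def pvGo (cur : List String) : List String → List String
  | [] => if cur ≠ [] then [PySem.Str.join " " cur] else []
  | w :: ws =>
    if w = "hai" ∧ (ws = [] ∨ ws.head? = some "aur") then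
      PySem.Str.join " " (cur ++ [w]) :: pvGo [] ws
    else pvGo (cur ++ [w]) ws

-- A's loop body, loop finish, and B's condition/body/finish, named for the proofs
def pvStepA (words : List String) (st : List String × List String) (i : Nat) : List String × List String :=
  let sentence := st.2 ++ [words.getD i ""]
  if words.getD i "" = "hai" ∧ (i = words.length - 1 ∨ words.getD (i+1) "" = "aur") then
    (st.1 ++ [PySem.Str.join " " sentence], ([] : List String))
  else (st.1, sentence)

def pvFinA (words : List String) (st : List String × List String) : List String :=
  if st.2 ≠ [] then st.1 ++ [PySem.Str.join " " st.2] else st.1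

def pvCondB (words : List String) (i : Nat) : Bool :=
  words.getD i "" == "hai" && (i == words.length - 1 || words.getD (i+1) "" == "aur")

def pvStepB (words : List String) (st : List String × Nat) (i : Nat) : List String × Nat :=
  (st.1 ++ [PySem.Str.join " " (PySem.List.slice words (some (st.2 : Int)) (some ((i : Int) + 1)))],
   i + 1)

def pvFinB (words : List String) (st : List String × Nat) : List String :=
  if st.2 < words.length then
    st.1 ++ [PySem.Str.join " " (PySem.List.slice words (some (st.2 : Int)) none)]
  else st.1

-- index-based boundary condition ↔ suffix-based condition of pvGo
theorem pvCond_bridge (words : List String) (j : Nat) (hjlt : j < words.length) :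
    (words.getD j "" = "hai" ∧ (j = words.length - 1 ∨ words.getD (j+1) "" = "aur"))
      ↔ (words[j] = "hai" ∧ (words.drop (j+1) = [] ∨ (words.drop (j+1)).head? = some "aur")) := by
  have hget : words.getD j "" = words[j] := List.getD_eq_getElem words "" hjlt
  have hc1 : (j = words.length - 1) ↔ words.drop (j+1) = [] := by
    rw [List.drop_eq_nil_iff]
    omega
  have hc2 : (words.getD (j+1) "" = "aur") ↔ (words.drop (j+1)).head? = some "aur" := by
    rw [List.head?_drop, List.getD_eq_getElem?_getD]
    cases h : words[j+1]? <;> simp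
  rw [hget, hc1, hc2]

theorem pvA_loop (words : List String) (m : Nat) : ∀ (j : Nat), j + m = words.length →
    ∀ (acc cur : List String),
    pvFinA words ((List.range' j m).foldl (pvStepA words) (acc, cur))
      = acc ++ pvGo cur (words.drop j) := by
  induction m with
  | zero =>
    intro j hj acc cur
    have hd : words.drop j = [] := List.drop_eq_nil_of_le (by omega)
    simp only [List.range', List.foldl_nil, hd, pvFinA, pvGo]
    split_ifs <;> simp_all
  | succ m ih =>
    intro j hj acc cur
    have hjlt : j < words.length := by omega
    have hdrop : words.drop j = words[j] :: words.drop (j+1) := List.drop_eq_getElem_cons hjlt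
    have hget : words.getD j "" = words[j] := List.getD_eq_getElem words "" hjlt
    rw [List.range'_succ, List.foldl_cons, hdrop]
    by_cases hcond : words.getD j "" = "hai" ∧ (j = words.length - 1 ∨ words.getD (j+1) "" = "aur")
    · have hstep : pvStepA words (acc, cur) j
          = (acc ++ [PySem.Str.join " " (cur ++ [words[j]])], []) := by
        simp only [pvStepA, hget]
        rw [if_pos ⟨hget.symm.trans hcond.1, hcond.2⟩]
      rw [hstep, ih (j+1) (by omega)]
      have hcond' := (pvCond_bridge words j hjlt).mp hcond
      simp only [pvGo, if_pos hcond']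
      simp
    · have hstep : pvStepA words (acc, cur) j = (acc, cur ++ [words[j]]) := by
        simp only [pvStepA, hget]
        rw [if_neg (fun h => hcond ⟨hget.trans h.1, h.2⟩)]
      rw [hstep, ih (j+1) (by omega)]
      have hcond' := (pvCond_bridge words j hjlt).not.mp hcond
      simp only [pvGo, if_neg hcond']

theorem pvCondB_iff (words : List String) (j : Nat) :
    pvCondB words j = true
      ↔ (words.getD j "" = "hai" ∧ (j = words.length - 1 ∨ words.getD (j+1) "" = "aur")) := by
  simp [pvCondB]

theorem pvTake_ext (words : List String) (j s : Nat) (hjlt : j < words.length) (hs : s ≤ j) :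
    (words.drop s).take (j - s) ++ [words[j]] = (words.drop s).take (j + 1 - s) := by
  have h1 : j + 1 - s = (j - s) + 1 := by omega
  have h2 : (words.drop s)[j - s]? = some words[j] := by
    rw [List.getElem?_drop]
    have : s + (j - s) = j := by omega
    rw [this, List.getElem?_eq_getElem hjlt]
  rw [h1, List.take_add_one, h2]
  simp

theorem pvB_loop (words : List String) (m : Nat) : ∀ (j start : Nat), j + m = words.length →
    start ≤ j → ∀ (acc : List String),
    pvFinB words (((List.range' j m).filter (pvCondB words)).foldl (pvStepB words) (acc, start))
      = acc ++ pvGo ((words.drop start).take (j - start)) (words.drop j) := by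
  induction m with
  | zero =>
    intro j start hj hs acc
    have hj' : j = words.length := by omega
    subst hj'
    have htake : (words.drop start).take (words.length - start) = words.drop start := by
      apply List.take_of_length_le
      simp
    simp only [List.range', List.filter_nil, List.foldl_nil, pvFinB, htake, List.drop_length, pvGo]
    by_cases h : start < words.length
    · have hne : words.drop start ≠ [] := by
        rw [Ne, List.drop_eq_nil_iff]
        omega
      rw [if_pos h, if_pos hne, PySem.List.slice_from_natCast]
    · have hnil : words.drop start = [] := List.drop_eq_nil_of_le (by omega)
      rw [if_neg h, if_neg (by simp [hnil])]
      simp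
  | succ m ih =>
    intro j start hj hs acc
    have hjlt : j < words.length := by omega
    have hdrop : words.drop j = words[j] :: words.drop (j+1) := List.drop_eq_getElem_cons hjlt
    rw [List.range'_succ, List.filter_cons]
    by_cases hb : pvCondB words j = true
    · rw [if_pos hb, List.foldl_cons]
      have hslice : PySem.List.slice words (some (start : Int)) (some ((j : Int) + 1))
          = (words.drop start).take (j + 1 - start) := by
        have hc : ((j : Int) + 1) = (((j + 1 : Nat)) : Int) := by push_cast; ring
        rw [hc, PySem.List.slice_natCast]
      have hstep : pvStepB words (acc, start) j
          = (acc ++ [PySem.Str.join " " ((words.drop start).take (j + 1 - start))], j + 1) := by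
        simp only [pvStepB, hslice]
      rw [hstep, ih (j+1) (j+1) (by omega) (by omega)]
      have hcond' := (pvCond_bridge words j hjlt).mp ((pvCondB_iff words j).mp hb)
      rw [hdrop]
      simp only [pvGo, if_pos hcond']
      rw [← pvTake_ext words j start hjlt hs]
      simp
    · rw [if_neg hb, ih (j+1) start (by omega) (by omega)]
      have hcond' := (pvCond_bridge words j hjlt).not.mp ((pvCondB_iff words j).not.mp hb)
      rw [hdrop]
      simp only [pvGo, if_neg hcond']
      rw [pvTake_ext words j start hjlt hs]

-- ===== VERDICT (by name: the statement is the Claim_ definition above) =====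
theorem splitSentence_spec : Claim_equal_splitSentence := by
  intro data _
  unfold Spec_splitSentence
  show splitSentence data = splitSentence_alt data
  have hA : splitSentence data
      = pvFinA ((PySem.Str.split? data " ").getD [])
          ((List.range' 0 ((PySem.Str.split? data " ").getD []).length).foldl
            (pvStepA ((PySem.Str.split? data " ").getD [])) ([], [])) := by
    rw [← List.range_eq_range']
    rfl
  have hB : splitSentence_alt data
      = pvFinB ((PySem.Str.split? data " ").getD [])
          (((List.range' 0 ((PySem.Str.split? data " ").getD []).length).filter
              (pvCondB ((PySem.Str.split? data " ").getD []))).foldl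
            (pvStepB ((PySem.Str.split? data " ").getD [])) ([], 0)) := by
    rw [← List.range_eq_range']
    rfl
  rw [hA, hB,
    pvA_loop ((PySem.Str.split? data " ").getD []) ((PySem.Str.split? data " ").getD []).length 0 (by omega) [] [],
    pvB_loop ((PySem.Str.split? data " ").getD []) ((PySem.Str.split? data " ").getD []).length 0 0 (by omega) (by omega) []]
  simp
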